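-- pv_equiv track=rewrite | github.com/aria1th/Torus-Hamilton-Decomposition | scripts/torus_nd_d5_tail_hypergraph_optimize.py | _antisymmetric_masks
-- ===== SOURCE A (Python) =====
-- from typing import Dict, List, Sequence, Tuple
--
-- def _antisymmetric_masks(m: int) -> List[int]:
--     pairs = [(delta, m - delta) for delta in range(1, (m - 1) // 2 + 1)]
--     out = []
--     for submask in range(1 << max(0, len(pairs) - 1)):
--         mask = 1
--         for pair_index, (left, right) in enumerate(pairs[1:], start=1):
--             choose_left = bool(submask & (1 << (pair_index - 1)))
--             chosen = left if choose_left else right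
--             mask |= 1 << (chosen - 1)
--         out.append(mask)
--     return out
-- ===== SOURCE B (Python) =====
-- from typing import List
--
-- def _antisymmetric_masks(m: int) -> List[int]:
--     # Doubling construction: instead of rebuilding each mask bit-by-bit for every
--     # submask, extend the output list one pair at a time: each new pair doubles the
--     # list, OR-ing its 'right' bit onto the first copy and its 'left' bit onto the
--     # second (the new pair acts as the next-higher submask bit).
--     pairs = [(delta, m - delta) for delta in range(1, (m - 1) // 2 + 1)]
--     out = [1]
--     for left, right in pairs[1:]:
--         rbit = 1 << (right - 1)
--         lbit = 1 << (left - 1)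
--         out = [x | rbit for x in out] + [x | lbit for x in out]
--     return out
-- ===== Notes on version B (the rewrite author's own statement) =====
-- stated objective: alternative
-- what changed: Replaces the per-submask inner loop that rebuilds each mask from its submask bits with a doubling construction that extends the output list once per pair, OR-ing one precomputed bit per existing element; linear-in-output work instead of an extra factor of the pair count, though a timing run could not confirm a speed-up at the largest generated sizes (both blow up with the exponentially sized output).
import Mathlib
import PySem

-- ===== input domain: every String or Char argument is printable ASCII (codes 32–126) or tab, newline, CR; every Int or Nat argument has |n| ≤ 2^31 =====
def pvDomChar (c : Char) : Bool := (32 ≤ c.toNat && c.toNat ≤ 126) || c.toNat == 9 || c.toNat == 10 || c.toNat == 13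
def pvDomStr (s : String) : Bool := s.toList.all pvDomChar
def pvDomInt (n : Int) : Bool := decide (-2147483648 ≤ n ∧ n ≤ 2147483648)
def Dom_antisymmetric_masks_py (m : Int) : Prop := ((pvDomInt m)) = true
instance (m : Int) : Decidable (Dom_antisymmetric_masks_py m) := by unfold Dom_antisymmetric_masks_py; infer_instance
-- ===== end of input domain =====

-- B replaces A's per-submask inner loop with a list-doubling construction (one pass over the
-- pair list, OR-ing one precomputed bit per existing element); equal return value proved on the
-- whole domain.

-- ===== PORT A =====
-- Notes: 'max(0, len(pairs)-1)' is Nat truncated subtraction 'pairs.length - 1'.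
-- Python's '<<' is Int.shiftLeft (exponent as Nat); pair_index ≥ 1 always and chosen ≥ 2 whenever
-- the inner loop runs (pairs[1:] ≠ [] forces m ≥ 5), so the '.toNat' on each exponent is exact:
-- Python never shifts by a negative amount here.
def antisymmetric_masks_py (m : Int) : List Int :=
  let pairs : List (Int × Int) :=
    (PySem.List.pyRange 1 (PySem.Int.floordiv (m - 1) 2 + 1) 1).map (fun delta => (delta, m - delta))
  (PySem.List.pyRange 0 (Int.shiftLeft 1 (pairs.length - 1)) 1).map (fun submask =>
    (PySem.List.enumerate (pairs.drop 1) 1).foldl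
      (fun mask pr =>
        let choose_left : Bool := PySem.Int.band submask (Int.shiftLeft 1 (pr.1 - 1).toNat) != 0
        let chosen : Int := if choose_left then pr.2.1 else pr.2.2
        PySem.Int.bor mask (Int.shiftLeft 1 (chosen - 1).toNat))
      1)

-- ===== PORT B =====
def antisymmetric_masks_py_alt (m : Int) : List Int :=
  let pairs : List (Int × Int) :=
    (PySem.List.pyRange 1 (PySem.Int.floordiv (m - 1) 2 + 1) 1).map (fun delta => (delta, m - delta))
  (pairs.drop 1).foldl
    (fun out pr =>
      let rbit : Int := Int.shiftLeft 1 (pr.2 - 1).toNat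
      let lbit : Int := Int.shiftLeft 1 (pr.1 - 1).toNat
      out.map (fun x => PySem.Int.bor x rbit) ++ out.map (fun x => PySem.Int.bor x lbit))
    [1]

-- ===== PRECONDITION & SPEC =====
def Spec_antisymmetric_masks_py (m : Int) (out : List Int) : Prop := out = antisymmetric_masks_py_alt m
instance (m : Int) (out : List Int) : Decidable (Spec_antisymmetric_masks_py m out) := by unfold Spec_antisymmetric_masks_py; infer_instance

-- ===== CLAIM (what is proved, stated in full; the proofs are below) =====
def Claim_equal_antisymmetric_masks_py : Prop := ∀ (m : Int), Dom_antisymmetric_masks_py m → Spec_antisymmetric_masks_py m (antisymmetric_masks_py m)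

-- ===== LEMMAS AND PROOFS =====

-- The OR of the chosen bits of the pair list L under the submask bits of s
-- (bit i of s chooses left/right of L[i]); computed in Nat.
def pvMaskBits : List (Int × Int) → Nat → Nat
  | [], _ => 0
  | p :: L, s => 2 ^ (((if s.testBit 0 then p.1 else p.2) - 1).toNat) ||| pvMaskBits L (s >>> 1)

theorem pvShift (k : Nat) : Int.shiftLeft 1 k = ((2 ^ k : Nat) : Int) := by
  show (1 : Int) <<< k = _
  rw [Int.shiftLeft_eq]; push_cast; ring_nf

theorem pvBandBit (s j : Nat) :
    (PySem.Int.band (↑s) (Int.shiftLeft 1 j) != 0) = s.testBit j := by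
  rw [pvShift, PySem.Int.band_natCast]
  rcases h : s.testBit j <;>
    simp [Nat.and_two_pow, h]

theorem pvLemA (L : List (Int × Int)) : ∀ (j mk s : Nat),
    (PySem.List.enumerate L ((j : Int) + 1)).foldl
      (fun mask pr =>
        let choose_left : Bool := PySem.Int.band (↑s) (Int.shiftLeft 1 (pr.1 - 1).toNat) != 0
        let chosen : Int := if choose_left then pr.2.1 else pr.2.2
        PySem.Int.bor mask (Int.shiftLeft 1 (chosen - 1).toNat))
      (↑mk)
    = ↑(mk ||| pvMaskBits L (s >>> j)) := by
  induction L with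
  | nil => intro j mk s; simp [PySem.List.enumerate_nil, pvMaskBits]
  | cons p L ih =>
    intro j mk s
    rw [PySem.List.enumerate_cons]
    simp only [List.foldl_cons]
    have h1 : ((j : Int) + 1 - 1) = (j : Nat) := by ring
    have h2 : ((j : Int) + 1 + 1) = ((j + 1 : Nat) : Int) + 1 := by push_cast; ring
    rw [h1, Int.toNat_natCast, pvBandBit, h2]
    have hbit : PySem.Int.bor (↑mk) (Int.shiftLeft 1 (((if s.testBit j then p.1 else p.2) - 1).toNat))
        = ↑(mk ||| 2 ^ (((if s.testBit j then p.1 else p.2) - 1).toNat)) := by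
      rw [pvShift, PySem.Int.bor_natCast]
    rw [hbit, ih (j + 1) _ s]
    have hsr : s >>> (j + 1) = (s >>> j) >>> 1 := by
      rw [Nat.shiftRight_add]
    have htb : (s >>> j).testBit 0 = s.testBit j := by
      simp
    rw [hsr]
    show (↑((mk ||| 2 ^ (((if s.testBit j then p.1 else p.2) - 1).toNat)) ||| pvMaskBits L (s >>> j >>> 1)) : Int)
        = ↑(mk ||| pvMaskBits (p :: L) (s >>> j))
    rw [pvMaskBits, htb, Nat.lor_assoc]

theorem pvRangeDouble (n : Nat) (f : Nat → List Int) :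
    (List.range (2 * n)).flatMap f = (List.range n).flatMap (fun t => f (2 * t) ++ f (2 * t + 1)) := by
  induction n with
  | zero => simp
  | succ n ih =>
    have h : 2 * (n + 1) = (2 * n + 1) + 1 := by ring
    rw [h, List.range_succ, List.range_succ, List.range_succ]
    simp only [List.flatMap_append, List.flatMap_cons, List.flatMap_nil, List.append_nil, ih]
    simp [List.append_assoc]

theorem pvLemB (L : List (Int × Int)) : ∀ (O : List Nat),
    L.foldl
      (fun out pr =>
        let rbit : Int := Int.shiftLeft 1 (pr.2 - 1).toNat
        let lbit : Int := Int.shiftLeft 1 (pr.1 - 1).toNat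
        out.map (fun x => PySem.Int.bor x rbit) ++ out.map (fun x => PySem.Int.bor x lbit))
      (O.map (Nat.cast : Nat → Int))
    = (List.range (2 ^ L.length)).flatMap
        (fun s => O.map (fun x => ((x ||| pvMaskBits L s : Nat) : Int))) := by
  induction L with
  | nil =>
    intro O
    simp [pvMaskBits]
  | cons p L ih =>
    intro O
    simp only [List.foldl_cons]
    have hmap : ∀ (e : Nat),
        (O.map (Nat.cast : Nat → Int)).map (fun x => PySem.Int.bor x (Int.shiftLeft 1 e))
          = (O.map (fun x : Nat => (x ||| 2 ^ e : Nat))).map (Nat.cast : Nat → Int) := by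
      intro e
      simp only [List.map_map]
      apply List.map_congr_left
      intro x _
      simp only [Function.comp_apply]
      rw [pvShift, PySem.Int.bor_natCast]
    have happ :
        (O.map (Nat.cast : Nat → Int)).map (fun x => PySem.Int.bor x (Int.shiftLeft 1 (p.2 - 1).toNat))
          ++ (O.map (Nat.cast : Nat → Int)).map (fun x => PySem.Int.bor x (Int.shiftLeft 1 (p.1 - 1).toNat))
        = ((O.map (fun x : Nat => (x ||| 2 ^ (p.2 - 1).toNat : Nat))
              ++ O.map (fun x : Nat => (x ||| 2 ^ (p.1 - 1).toNat : Nat))).map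
            (Nat.cast : Nat → Int)) := by
      rw [List.map_append, hmap, hmap]
    rw [happ, ih]
    have hlen : (2 : Nat) ^ (p :: L).length = 2 * 2 ^ L.length := by
      simp [List.length_cons, pow_succ]; ring
    rw [hlen, pvRangeDouble]
    apply List.flatMap_congr
    intro t _
    have hmr : pvMaskBits (p :: L) (2 * t) = 2 ^ ((p.2 - 1).toNat) ||| pvMaskBits L t := by
      rw [pvMaskBits]
      have hb : (2 * t).testBit 0 = false := by
        simp [Nat.testBit_zero]
      have hs : (2 * t) >>> 1 = t := by
        simp [Nat.shiftRight_one]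
      rw [hb, hs]
      simp
    have hml : pvMaskBits (p :: L) (2 * t + 1) = 2 ^ ((p.1 - 1).toNat) ||| pvMaskBits L t := by
      rw [pvMaskBits]
      have hb : (2 * t + 1).testBit 0 = true := by
        simp [Nat.testBit_zero]
      have hs : (2 * t + 1) >>> 1 = t := by
        simp [Nat.shiftRight_one]
        omega
      rw [hb, hs]
      simp
    simp only [List.map_append, List.map_map]
    congr 1
    · apply List.map_congr_left
      intro x _
      simp only [Function.comp_apply, hmr, Nat.lor_assoc]
    · apply List.map_congr_left
      intro x _
      simp only [Function.comp_apply, hml, Nat.lor_assoc]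

-- ===== VERDICT (by name: the statement is the Claim_ definition above) =====
theorem antisymmetric_masks_py_spec : Claim_equal_antisymmetric_masks_py := by
  intro m _
  unfold Spec_antisymmetric_masks_py
  simp only [antisymmetric_masks_py, antisymmetric_masks_py_alt]
  generalize (PySem.List.pyRange 1 (PySem.Int.floordiv (m - 1) 2 + 1) 1).map
      (fun delta => (delta, m - delta)) = P
  generalize hL : List.drop 1 P = L
  have hlen : P.length - 1 = L.length := by
    rw [← hL, List.length_drop]
  rw [hlen, pvShift, PySem.List.pyRange_one]
  have h2k : (((2 ^ L.length : Nat) : Int) - 0).toNat = 2 ^ L.length := by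
    rw [sub_zero, Int.toNat_natCast]
  rw [h2k, List.map_map]
  have hB := pvLemB L [1]
  simp only [List.map_cons, List.map_nil, Nat.cast_one] at hB
  rw [hB]
  have hsing : (List.range (2 ^ L.length)).flatMap
        (fun s => [((1 ||| pvMaskBits L s : Nat) : Int)])
      = (List.range (2 ^ L.length)).map (fun s => ((1 ||| pvMaskBits L s : Nat) : Int)) := by
    rw [← List.map_eq_flatMap]
  rw [hsing]
  apply List.map_congr_left
  intro i _
  simp only [Function.comp_apply]
  have h0 : ((0 : Int) + (i : Int)) = ((i : Nat) : Int) := by ring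
  have hA := pvLemA L 0 1 i
  simp only [Nat.shiftRight_zero, Nat.cast_zero, zero_add, Nat.cast_one] at hA
  simp only [h0]
  exact hA
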